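-- pv_equiv track=rewrite | github.com/plooi/DerivativeEvaluator | derivative_evaluator.py | find_term_end
-- ===== SOURCE A (Python) =====
-- def find_close(open_paren, string):
--     if string[open_paren] != "(":
--         raise Exception("bad")
--     i = open_paren
--     paren_level = 0
--     while i < len(string):
--         if string[i] == "(": paren_level += 1
--         if string[i] == ")": paren_level -= 1
--
--         if paren_level == 0: return i
--         i += 1
--     fail("No close paren for %d, %s" % (open_paren, string))
--
-- def find_term_end(string, start):
--     i = start
--     while i < len(string):
--         if string[i] not in ["+","-"]:
--             break
--         i += 1
--
--     while i < len(string):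
--         if string[i] == "(":
--             i = find_close(i, string)+1
--             continue
--         if string[i] in ["+", "-", ")"]:
--             break
--         i += 1
--     return i
--
-- def fail(msg):
--     raise Exception(msg)
-- ===== SOURCE B (Python) =====
-- def find_term_end(string, start):
--     i = start
--     while i < len(string) and string[i] in "+-":
--         i += 1
--     depth = 0
--     while i < len(string):
--         c = string[i]
--         if c == "(":
--             depth += 1
--         elif c == ")":
--             if depth == 0:
--                 break
--             depth -= 1
--         elif depth == 0 and c in "+-":
--             break
--         i += 1
--     return i
-- ===== Notes on version B (the rewrite author's own statement) =====
-- stated objective: simpler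
-- what changed: Replaced the outer loop that calls the find_close helper (a second scan that re-walks each parenthesised group to find its matching ')') and jumps past it with a single while loop that maintains one integer paren-depth counter and breaks on a top-level '+', '-' or ')'; where A raises on an unmatched '(' B just returns the scan end.
import Mathlib
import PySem

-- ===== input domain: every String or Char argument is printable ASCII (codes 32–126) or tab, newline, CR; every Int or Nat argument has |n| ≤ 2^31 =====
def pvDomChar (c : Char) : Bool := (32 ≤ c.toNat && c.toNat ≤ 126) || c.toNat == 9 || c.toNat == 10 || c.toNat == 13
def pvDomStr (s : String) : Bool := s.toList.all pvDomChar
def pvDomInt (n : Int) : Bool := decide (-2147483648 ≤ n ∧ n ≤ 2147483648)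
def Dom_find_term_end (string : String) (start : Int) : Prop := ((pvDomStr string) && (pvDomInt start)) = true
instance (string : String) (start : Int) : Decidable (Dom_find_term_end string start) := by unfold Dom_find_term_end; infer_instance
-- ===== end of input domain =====

-- B replaces A's find_close helper (which re-scans from each '(' and jumps past it) by a single
-- depth-counting pass, and simply returns at end-of-string where A raises (simpler; return value only).

-- shared small helpers (pure character tests; used by the ports and by Pre_)
def pvIsSign (c : Char) : Bool := c == '+' || c == '-'
def pvIsStop (c : Char) : Bool := c == '+' || c == '-' || c == ')'
def pvDelta (c : Char) : Int := if c = '(' then 1 else if c = ')' then -1 else 0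
def pvCharAt (s : List Char) (i : Int) : Char := (PySem.List.pyGet? s i).getD ' '

-- ===== PORT A =====
-- the Nat fuel only makes the while-loops structurally recursive; entry points pass enough fuel.

-- `while i < len(string): if string[i] not in ["+","-"]: break; i += 1`
def skipSignsA (s : List Char) : Nat → Int → Int
  | 0, i => i
  | fuel+1, i =>
    if i < (s.length : Int) then
      match PySem.List.pyGet? s i with
      | none => i                    -- Python: IndexError (excluded by Pre_)
      | some c => if c = '+' ∨ c = '-' then skipSignsA s fuel (i+1) else i
    else i

-- find_close's while-loop; pvDelta c is exactly its two `if` updates of paren_level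
def findCloseAux (s : List Char) : Nat → Int → Int → Option Int
  | 0, _, _ => none
  | fuel+1, i, level =>
    if i < (s.length : Int) then
      match PySem.List.pyGet? s i with
      | none => none                 -- Python: IndexError
      | some c =>
        if level + pvDelta c = 0 then some i
        else findCloseAux s fuel (i+1) (level + pvDelta c)
    else none                        -- Python: fail("No close paren ...")

def findClose (s : List Char) (openp : Int) : Option Int :=
  if PySem.List.pyGet? s openp = some '(' then
    findCloseAux s (((s.length : Int) - openp).toNat) openp 0
  else none                          -- Python: raise Exception("bad")

-- A's second while-loop
def loopA (s : List Char) : Nat → Int → Int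
  | 0, i => i
  | fuel+1, i =>
    if i < (s.length : Int) then
      match PySem.List.pyGet? s i with
      | none => i                    -- Python: IndexError
      | some c =>
        if c = '(' then
          match findClose s i with
          | none => i                -- Python: the exception propagates
          | some j => if i < j then loopA s fuel (j+1) else i
        else if c = '+' ∨ c = '-' ∨ c = ')' then i
        else loopA s fuel (i+1)
    else i

def find_term_end (string : String) (start : Int) : Int :=
  let s := string.toList
  let i0 := skipSignsA s (((s.length : Int) - start).toNat) start
  loopA s (((s.length : Int) - i0).toNat) i0

-- ===== PORT B =====
-- `while i < len(string) and string[i] in "+-": i += 1`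
def skipSignsB (s : List Char) : Nat → Int → Int
  | 0, i => i
  | fuel+1, i =>
    if i < (s.length : Int) then
      match PySem.List.pyGet? s i with
      | none => i                    -- Python: IndexError
      | some c => if pvIsSign c then skipSignsB s fuel (i+1) else i
    else i

-- B's single depth-counting pass
def loopB (s : List Char) : Nat → Int → Int → Int
  | 0, i, _ => i
  | fuel+1, i, depth =>
    if i < (s.length : Int) then
      match PySem.List.pyGet? s i with
      | none => i                    -- Python: IndexError
      | some c =>
        if c = '(' then loopB s fuel (i+1) (depth+1)
        else if c = ')' then (if depth = 0 then i else loopB s fuel (i+1) (depth-1))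
        else if depth = 0 ∧ (c = '+' ∨ c = '-') then i
        else loopB s fuel (i+1) depth
    else i

def find_term_end_alt (string : String) (start : Int) : Int :=
  let s := string.toList
  let i0 := skipSignsB s (((s.length : Int) - start).toNat) start
  loopB s (((s.length : Int) - i0).toNat) i0 0

-- ===== PRECONDITION & SPEC =====
-- signed '(' minus ')' count over the k characters at positions a, a+1, … (out-of-range reads count 0)
def pvDD (s : List Char) : Int → Nat → Int
  | _, 0 => 0
  | a, k+1 => pvDelta (pvCharAt s a) + pvDD s (a+1) k

-- length of the maximal run of '+'/'-' at positions start, start+1, …, len-1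
def pvSignPrefixLen (s : List Char) (start : Int) : Nat :=
  (((PySem.List.pyRange start (s.length : Int) 1).map (pvCharAt s)).takeWhile pvIsSign).length

-- the scan from a ends normally: some prefix depth hits 0 at a top-level '+','-' or ')', or the rest is balanced
def pvOkB (s : List Char) (a : Int) : Bool :=
  ((List.range (((s.length : Int) - a).toNat)).any fun k =>
      pvDD s a k == 0 && pvIsStop (pvCharAt s (a + k)))
  || pvDD s a (((s.length : Int) - a).toNat) == 0

-- Pre_ excludes exactly the inputs on which Python A raises: an out-of-range start index
-- (IndexError) and strings whose scanned part has an unmatched '(' (A's "No close paren" Exception).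
def Pre_find_term_end (string : String) (start : Int) : Prop :=
  (start < (string.toList.length : Int) → -(string.toList.length : Int) ≤ start)
  ∧ pvOkB string.toList (start + (pvSignPrefixLen string.toList start : Int)) = true
instance (string : String) (start : Int) : Decidable (Pre_find_term_end string start) := by
  unfold Pre_find_term_end; infer_instance

def pvWitness_find_term_end : String × Int := ("-(a+b)*2+c", 0)

def Spec_find_term_end (string : String) (start : Int) (out : Int) : Prop := out = find_term_end_alt string start
instance (string : String) (start : Int) (out : Int) : Decidable (Spec_find_term_end string start out) := by unfold Spec_find_term_end; infer_instance

-- ===== CLAIM (what is proved, stated in full; the proofs are below) =====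
def Claim_equal_find_term_end : Prop := ∀ (string : String) (start : Int), Dom_find_term_end string start → Pre_find_term_end string start → Spec_find_term_end string start (find_term_end string start)

-- ===== LEMMAS AND PROOFS =====

-- Prop form of pvOkB
def pvOkP (s : List Char) (a : Int) : Prop :=
  (∃ k : Nat, k < (((s.length : Int) - a).toNat) ∧ pvDD s a k = 0 ∧ pvIsStop (pvCharAt s (a + k)) = true)
  ∨ pvDD s a (((s.length : Int) - a).toNat) = 0

lemma okB_iff (s : List Char) (a : Int) : pvOkB s a = true ↔ pvOkP s a := by
  simp [pvOkB, pvOkP, List.any_eq_true, List.mem_range]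

lemma charAt_eq {s : List Char} {i : Int} {c : Char} (h : PySem.List.pyGet? s i = some c) :
    pvCharAt s i = c := by simp [pvCharAt, h]

lemma getSome_range {s : List Char} {i : Int} {c : Char} (h : PySem.List.pyGet? s i = some c) :
    -(s.length : Int) ≤ i ∧ i < (s.length : Int) := by
  by_contra hc
  have hn : PySem.List.pyGet? s i = none := by
    rw [PySem.List.pyGet?_eq_none_iff]
    simpa [PySem.Raise.InRange] using hc
  simp [h] at hn

lemma getSome_of_range {s : List Char} {i : Int} (h1 : -(s.length : Int) ≤ i)
    (h2 : i < (s.length : Int)) : ∃ c, PySem.List.pyGet? s i = some c := by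
  cases hx : PySem.List.pyGet? s i with
  | none =>
      rw [PySem.List.pyGet?_eq_none_iff] at hx
      unfold PySem.Raise.InRange at hx
      exact absurd ⟨h1, h2⟩ hx
  | some c => exact ⟨c, rfl⟩

lemma dd_succ (s : List Char) (a : Int) (k : Nat) :
    pvDD s a (k+1) = pvDelta (pvCharAt s a) + pvDD s (a+1) k := rfl

lemma dd_add (s : List Char) : ∀ (m t : Nat) (a : Int),
    pvDD s a (m+t) = pvDD s a m + pvDD s (a + (m : Int)) t := by
  intro m
  induction m with
  | zero => intro t a; simp [pvDD]
  | succ m ih =>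
      intro t a
      have h1 : m+1+t = (m+t)+1 := by omega
      rw [h1, dd_succ, ih, dd_succ]
      have h2 : a + 1 + (m : Int) = a + ((m : Int) + 1) := by ring
      rw [h2]
      push_cast
      ring

lemma delta_cases (c : Char) : pvDelta c = 1 ∨ pvDelta c = -1 ∨ pvDelta c = 0 := by
  unfold pvDelta; split_ifs <;> simp

lemma delta_other {c : Char} (h1 : c ≠ '(') (h2 : c ≠ ')') : pvDelta c = 0 := by
  simp [pvDelta, h1, h2]

lemma delta_eq_neg_one {c : Char} (h : pvDelta c = -1) : c = ')' := by
  by_cases h2 : c = ')'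
  · exact h2
  · by_cases h1 : c = '('
    · rw [h1] at h; exact absurd h (by decide)
    · rw [delta_other h1 h2] at h; exact absurd h (by decide)

-- step lemmas for the loops
lemma loopA_ge {s : List Char} {f : Nat} {i : Int} (h : ¬ i < (s.length : Int)) :
    loopA s f i = i := by cases f <;> simp [loopA, h]

lemma loopA_none {s : List Char} {f : Nat} {i : Int} (h : i < (s.length : Int))
    (hg : PySem.List.pyGet? s i = none) : loopA s (f+1) i = i := by simp [loopA, h, hg]

lemma loopA_open {s : List Char} {f : Nat} {i j : Int} (h : i < (s.length : Int))
    (hg : PySem.List.pyGet? s i = some '(') (hfc : findClose s i = some j) (hij : i < j) :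
    loopA s (f+1) i = loopA s f (j+1) := by simp [loopA, h, hg, hfc, hij]

lemma loopA_stop {s : List Char} {f : Nat} {i : Int} {c : Char} (h : i < (s.length : Int))
    (hg : PySem.List.pyGet? s i = some c) (hc1 : c ≠ '(') (hst : c = '+' ∨ c = '-' ∨ c = ')') :
    loopA s (f+1) i = i := by simp [loopA, h, hg, hc1, hst]

lemma loopA_other {s : List Char} {f : Nat} {i : Int} {c : Char} (h : i < (s.length : Int))
    (hg : PySem.List.pyGet? s i = some c) (hc1 : c ≠ '(') (hst : ¬(c = '+' ∨ c = '-' ∨ c = ')')) :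
    loopA s (f+1) i = loopA s f (i+1) := by simp [loopA, h, hg, hc1, hst]

lemma loopB_ge {s : List Char} {f : Nat} {i d : Int} (h : ¬ i < (s.length : Int)) :
    loopB s f i d = i := by cases f <;> simp [loopB, h]

lemma loopB_none {s : List Char} {f : Nat} {i d : Int} (h : i < (s.length : Int))
    (hg : PySem.List.pyGet? s i = none) : loopB s (f+1) i d = i := by simp [loopB, h, hg]

lemma loopB_open {s : List Char} {f : Nat} {i d : Int} (h : i < (s.length : Int))
    (hg : PySem.List.pyGet? s i = some '(') : loopB s (f+1) i d = loopB s f (i+1) (d+1) := by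
  simp [loopB, h, hg]

lemma loopB_close0 {s : List Char} {f : Nat} {i : Int} (h : i < (s.length : Int))
    (hg : PySem.List.pyGet? s i = some ')') : loopB s (f+1) i 0 = i := by simp [loopB, h, hg]

lemma loopB_close {s : List Char} {f : Nat} {i d : Int} (h : i < (s.length : Int))
    (hg : PySem.List.pyGet? s i = some ')') (hd : d ≠ 0) :
    loopB s (f+1) i d = loopB s f (i+1) (d-1) := by simp [loopB, h, hg, hd]

lemma loopB_sign0 {s : List Char} {f : Nat} {i : Int} {c : Char} (h : i < (s.length : Int))
    (hg : PySem.List.pyGet? s i = some c) (hc1 : c ≠ '(') (hc2 : c ≠ ')')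
    (hst : c = '+' ∨ c = '-') : loopB s (f+1) i 0 = i := by simp [loopB, h, hg, hc1, hc2, hst]

lemma loopB_other {s : List Char} {f : Nat} {i d : Int} {c : Char} (h : i < (s.length : Int))
    (hg : PySem.List.pyGet? s i = some c) (hc1 : c ≠ '(') (hc2 : c ≠ ')')
    (hst : ¬(d = 0 ∧ (c = '+' ∨ c = '-'))) : loopB s (f+1) i d = loopB s f (i+1) d := by
  simp [loopB, h, hg, hc1, hc2, hst]

lemma fca_ge {s : List Char} {f : Nat} {i lvl : Int} (h : ¬ i < (s.length : Int)) :
    findCloseAux s f i lvl = none := by cases f <;> simp [findCloseAux, h]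

lemma fca_ret {s : List Char} {f : Nat} {i lvl : Int} {c : Char} (h : i < (s.length : Int))
    (hg : PySem.List.pyGet? s i = some c) (h0 : lvl + pvDelta c = 0) :
    findCloseAux s (f+1) i lvl = some i := by simp [findCloseAux, h, hg, h0]

lemma fca_step {s : List Char} {f : Nat} {i lvl : Int} {c : Char} (h : i < (s.length : Int))
    (hg : PySem.List.pyGet? s i = some c) (h0 : lvl + pvDelta c ≠ 0) :
    findCloseAux s (f+1) i lvl = findCloseAux s f (i+1) (lvl + pvDelta c) := by
  simp [findCloseAux, h, hg, h0]

-- sign-prefix characterisation of the skip loops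
lemma prefix_nil {s : List Char} {i : Int} (h : (s.length : Int) ≤ i) :
    pvSignPrefixLen s i = 0 := by
  unfold pvSignPrefixLen
  rw [PySem.List.pyRange_one_eq_nil h]
  simp

lemma prefix_step_sign {s : List Char} {i : Int} {c : Char} (hlt : i < (s.length : Int))
    (hget : PySem.List.pyGet? s i = some c) (hsign : pvIsSign c = true) :
    pvSignPrefixLen s i = pvSignPrefixLen s (i+1) + 1 := by
  unfold pvSignPrefixLen
  rw [PySem.List.pyRange_one_cons hlt]
  simp [charAt_eq hget, hsign]

lemma prefix_step_stop {s : List Char} {i : Int} (hlt : i < (s.length : Int))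
    (hns : pvIsSign (pvCharAt s i) = false) : pvSignPrefixLen s i = 0 := by
  unfold pvSignPrefixLen
  rw [PySem.List.pyRange_one_cons hlt]
  simp [hns]

lemma skipA_eq (s : List Char) : ∀ (fuel : Nat) (i : Int),
    (((s.length : Int) - i).toNat ≤ fuel) →
    skipSignsA s fuel i = i + (pvSignPrefixLen s i : Int) := by
  intro fuel
  induction fuel with
  | zero =>
      intro i hN
      rw [prefix_nil (by omega)]
      simp [skipSignsA]
  | succ fuel ih =>
      intro i hN
      by_cases hlt : i < (s.length : Int)
      · cases hget : PySem.List.pyGet? s i with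
        | none =>
            have hch : pvCharAt s i = ' ' := by simp [pvCharAt, hget]
            rw [prefix_step_stop hlt (by rw [hch]; decide)]
            simp [skipSignsA, hlt, hget]
        | some c =>
            by_cases hsign : c = '+' ∨ c = '-'
            · have hsb : pvIsSign c = true := by
                rcases hsign with h | h <;> simp [pvIsSign, h]
              have hred : skipSignsA s (fuel+1) i = skipSignsA s fuel (i+1) := by
                simp [skipSignsA, hlt, hget, hsign]
              rw [hred, ih (i+1) (by omega), prefix_step_sign hlt hget hsb]
              push_cast
              ring
            · have h1 : c ≠ '+' := fun h => hsign (Or.inl h)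
              have h2 : c ≠ '-' := fun h => hsign (Or.inr h)
              have hsb : pvIsSign c = false := by simp [pvIsSign, h1, h2]
              have hred : skipSignsA s (fuel+1) i = i := by
                simp [skipSignsA, hlt, hget, hsign]
              rw [hred, prefix_step_stop hlt (by rw [charAt_eq hget]; exact hsb)]
              simp
      · rw [prefix_nil (by omega)]
        simp [skipSignsA, hlt]

lemma skipB_eq (s : List Char) : ∀ (fuel : Nat) (i : Int),
    (((s.length : Int) - i).toNat ≤ fuel) →
    skipSignsB s fuel i = i + (pvSignPrefixLen s i : Int) := by
  intro fuel
  induction fuel with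
  | zero =>
      intro i hN
      rw [prefix_nil (by omega)]
      simp [skipSignsB]
  | succ fuel ih =>
      intro i hN
      by_cases hlt : i < (s.length : Int)
      · cases hget : PySem.List.pyGet? s i with
        | none =>
            have hch : pvCharAt s i = ' ' := by simp [pvCharAt, hget]
            rw [prefix_step_stop hlt (by rw [hch]; decide)]
            simp [skipSignsB, hlt, hget]
        | some c =>
            cases hsb : pvIsSign c with
            | true =>
                have hred : skipSignsB s (fuel+1) i = skipSignsB s fuel (i+1) := by
                  simp [skipSignsB, hlt, hget, hsb]
                rw [hred, ih (i+1) (by omega), prefix_step_sign hlt hget hsb]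
                push_cast
                ring
            | false =>
                have hred : skipSignsB s (fuel+1) i = i := by
                  simp [skipSignsB, hlt, hget, hsb]
                rw [hred, prefix_step_stop hlt (by rw [charAt_eq hget]; exact hsb)]
                simp
      · rw [prefix_nil (by omega)]
        simp [skipSignsB, hlt]

-- fuel irrelevance for loopB
lemma loopB_fuel (s : List Char) : ∀ (f1 f2 : Nat) (i d : Int),
    (((s.length : Int) - i).toNat ≤ f1) → (((s.length : Int) - i).toNat ≤ f2) →
    loopB s f1 i d = loopB s f2 i d := by
  intro f1
  induction f1 with
  | zero =>
      intro f2 i d h1 h2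
      have hge : ¬ i < (s.length : Int) := by omega
      rw [loopB_ge hge, loopB_ge hge]
  | succ f1 ih =>
      intro f2 i d h1 h2
      by_cases hlt : i < (s.length : Int)
      · obtain ⟨f2', rfl⟩ : ∃ f2', f2 = f2'+1 := ⟨f2-1, by omega⟩
        cases hget : PySem.List.pyGet? s i with
        | none => rw [loopB_none hlt hget, loopB_none hlt hget]
        | some c =>
            by_cases hc1 : c = '('
            · subst hc1
              rw [loopB_open hlt hget, loopB_open hlt hget]
              exact ih f2' (i+1) (d+1) (by omega) (by omega)
            · by_cases hc2 : c = ')'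
              · subst hc2
                by_cases hd : d = 0
                · subst hd
                  rw [loopB_close0 hlt hget, loopB_close0 hlt hget]
                · rw [loopB_close hlt hget hd, loopB_close hlt hget hd]
                  exact ih f2' (i+1) (d-1) (by omega) (by omega)
              · by_cases hst : d = 0 ∧ (c = '+' ∨ c = '-')
                · obtain ⟨hd0, hpm⟩ := hst
                  subst hd0
                  rw [loopB_sign0 hlt hget hc1 hc2 hpm, loopB_sign0 hlt hget hc1 hc2 hpm]
                · rw [loopB_other hlt hget hc1 hc2 hst, loopB_other hlt hget hc1 hc2 hst]
                  exact ih f2' (i+1) d (by omega) (by omega)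
      · rw [loopB_ge hlt, loopB_ge hlt]

-- characterisation of a successful find_close scan
lemma fca_none {s : List Char} {f : Nat} {i lvl : Int} (h : i < (s.length : Int))
    (hg : PySem.List.pyGet? s i = none) : findCloseAux s (f+1) i lvl = none := by
  simp [findCloseAux, h, hg]

lemma fc_char (s : List Char) : ∀ (fFC : Nat) (a lvl j : Int),
    (((s.length : Int) - a).toNat ≤ fFC) → 0 < lvl → findCloseAux s fFC a lvl = some j →
    a ≤ j ∧ j < (s.length : Int) ∧
    (∀ m : Nat, (m : Int) ≤ j - a → 0 < lvl + pvDD s a m) ∧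
    lvl + pvDD s a ((j + 1 - a).toNat) = 0 := by
  intro fFC
  induction fFC with
  | zero =>
      intro a lvl j hN hpos hfc
      rw [fca_ge (by omega)] at hfc
      exact absurd hfc (by simp)
  | succ fFC ih =>
      intro a lvl j hN hpos hfc
      by_cases hlt : a < (s.length : Int)
      · cases hget : PySem.List.pyGet? s a with
        | none =>
            rw [fca_none hlt hget] at hfc
            exact absurd hfc (by simp)
        | some c =>
            by_cases h0 : lvl + pvDelta c = 0
            · rw [fca_ret hlt hget h0] at hfc
              have hja : a = j := by injection hfc
              subst hja
              refine ⟨le_refl _, hlt, ?_, ?_⟩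
              · intro m hm
                have hm0 : m = 0 := by omega
                subst hm0
                simpa [pvDD] using hpos
              · have h1 : (a + 1 - a).toNat = 1 := by omega
                rw [h1, dd_succ, charAt_eq hget]
                simp only [pvDD]
                linarith
            · rw [fca_step hlt hget h0] at hfc
              have hdc := delta_cases c
              have hpos' : 0 < lvl + pvDelta c := by
                rcases hdc with h | h | h <;> rw [h] at h0 ⊢ <;> omega
              obtain ⟨hij, hjn, hfirst, hfinal⟩ := ih (a+1) (lvl + pvDelta c) j (by omega) hpos' hfc
              refine ⟨by omega, hjn, ?_, ?_⟩
              · intro m hm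
                cases m with
                | zero => simpa [pvDD] using hpos
                | succ m' =>
                    rw [dd_succ, charAt_eq hget]
                    have h5 := hfirst m' (by push_cast at hm ⊢; omega)
                    linarith
              · have hK : (j + 1 - a).toNat = (j + 1 - (a+1)).toNat + 1 := by omega
                rw [hK, dd_succ, charAt_eq hget]
                linarith
      · rw [fca_ge hlt] at hfc
        exact absurd hfc (by simp)

-- the find_close scan succeeds when some prefix depth returns to 0
lemma fc_some (s : List Char) : ∀ (fuel : Nat) (a lvl : Int),
    (((s.length : Int) - a).toNat ≤ fuel) → 0 < lvl → -(s.length : Int) ≤ a →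
    (∃ m : Nat, (m : Int) ≤ (s.length : Int) - a ∧ lvl + pvDD s a m = 0) →
    ∃ j, findCloseAux s fuel a lvl = some j := by
  intro fuel
  induction fuel with
  | zero =>
      intro a lvl hN hpos hr ⟨m, hm, hdd⟩
      have hm0 : m = 0 := by omega
      subst hm0
      simp [pvDD] at hdd
      omega
  | succ fuel ih =>
      intro a lvl hN hpos hr ⟨m, hm, hdd⟩
      by_cases hlt : a < (s.length : Int)
      · obtain ⟨c, hget⟩ := getSome_of_range hr hlt
        by_cases h0 : lvl + pvDelta c = 0
        · exact ⟨a, fca_ret hlt hget h0⟩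
        · rw [fca_step hlt hget h0]
          have hdc := delta_cases c
          have hpos' : 0 < lvl + pvDelta c := by
            rcases hdc with h | h | h <;> rw [h] at h0 ⊢ <;> omega
          apply ih (a+1) (lvl + pvDelta c) (by omega) hpos' (by omega)
          obtain ⟨m', rfl⟩ : ∃ m', m = m'+1 := by
            refine ⟨m-1, ?_⟩
            rcases Nat.eq_zero_or_pos m with rfl | h
            · exfalso; simp [pvDD] at hdd; omega
            · omega
          rw [dd_succ, charAt_eq hget] at hdd
          exact ⟨m', by push_cast at hm ⊢; omega, by linarith⟩
      · have hm0 : m = 0 := by omega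
        subst hm0
        simp [pvDD] at hdd
        omega

-- B's loop walks through a balanced group exactly as find_close does
lemma fc_loopB (s : List Char) (fB2 : Nat) : ∀ (fFC : Nat) (a lvl j : Int) (fB : Nat),
    (((s.length : Int) - a).toNat ≤ fFC) → (((s.length : Int) - a).toNat ≤ fB) →
    (((s.length : Int) - (j+1)).toNat ≤ fB2) → 0 < lvl →
    findCloseAux s fFC a lvl = some j → loopB s fB a lvl = loopB s fB2 (j+1) 0 := by
  intro fFC
  induction fFC with
  | zero =>
      intro a lvl j fB hN hB hB2 hpos hfc
      rw [fca_ge (by omega)] at hfc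
      exact absurd hfc (by simp)
  | succ fFC ih =>
      intro a lvl j fB hN hB hB2 hpos hfc
      by_cases hlt : a < (s.length : Int)
      · obtain ⟨fb, rfl⟩ : ∃ fb, fB = fb+1 := ⟨fB-1, by omega⟩
        cases hget : PySem.List.pyGet? s a with
        | none =>
            rw [fca_none hlt hget] at hfc
            exact absurd hfc (by simp)
        | some c =>
            by_cases h0 : lvl + pvDelta c = 0
            · rw [fca_ret hlt hget h0] at hfc
              have hja : a = j := by injection hfc
              subst hja
              have hdc := delta_cases c
              have hd1 : pvDelta c = -1 := by rcases hdc with h | h | h <;> omega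
              have hlvl : lvl = 1 := by omega
              subst hlvl
              have hc := delta_eq_neg_one hd1
              subst hc
              rw [loopB_close hlt hget (by norm_num)]
              norm_num
              exact loopB_fuel s fb fB2 (a+1) 0 (by omega) hB2
            · rw [fca_step hlt hget h0] at hfc
              have hdc := delta_cases c
              have hpos' : 0 < lvl + pvDelta c := by
                rcases hdc with h | h | h <;> rw [h] at h0 ⊢ <;> omega
              by_cases hc1 : c = '('
              · subst hc1
                rw [loopB_open hlt hget]
                have hdd : pvDelta '(' = 1 := rfl
                rw [hdd] at hfc hpos'
                exact ih (a+1) (lvl+1) j fb (by omega) (by omega) hB2 hpos' hfc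
              · by_cases hc2 : c = ')'
                · subst hc2
                  have hdd : pvDelta ')' = -1 := rfl
                  rw [hdd] at hfc hpos'
                  rw [loopB_close hlt hget (by omega)]
                  exact ih (a+1) (lvl-1) j fb (by omega) (by omega) hB2 (by omega)
                    (by rw [show lvl + -1 = lvl - 1 by ring] at hfc; exact hfc)
                · have hdd : pvDelta c = 0 := delta_other hc1 hc2
                  rw [hdd] at hfc hpos'
                  rw [loopB_other hlt hget hc1 hc2 (by rintro ⟨h5, -⟩; omega)]
                  exact ih (a+1) lvl j fb (by omega) (by omega) hB2 (by omega)
                    (by rw [show lvl + 0 = lvl by ring] at hfc; exact hfc)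
      · rw [fca_ge hlt] at hfc
        exact absurd hfc (by simp)

lemma isStop_iff (c : Char) : pvIsStop c = true ↔ (c = '+' ∨ c = '-' ∨ c = ')') := by
  simp [pvIsStop, or_assoc]

-- the ok-invariant survives an ordinary (non-paren, non-stop) character
lemma okP_step {s : List Char} {i : Int} {c : Char} (hget : PySem.List.pyGet? s i = some c)
    (hc1 : c ≠ '(') (hc2 : c ≠ ')') (hst : ¬(c = '+' ∨ c = '-' ∨ c = ')'))
    (hok : pvOkP s i) : pvOkP s (i+1) := by
  have hrange := getSome_range hget
  have hd0 : pvDelta c = 0 := delta_other hc1 hc2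
  have hdd1 : ∀ k : Nat, pvDD s i (k+1) = pvDD s (i+1) k := fun k => by
    rw [dd_succ, charAt_eq hget, hd0]; ring
  cases hok with
  | inl h =>
      obtain ⟨k, hk, hdd, hstop⟩ := h
      obtain ⟨k', rfl⟩ : ∃ k', k = k'+1 := by
        have hkpos : 0 < k := by
          rcases Nat.eq_zero_or_pos k with rfl | h5
          · exfalso
            rw [show i + ((0:Nat):Int) = i by simp, charAt_eq hget] at hstop
            exact hst ((isStop_iff c).1 hstop)
          · exact h5
        exact ⟨k-1, by omega⟩
      left
      refine ⟨k', by omega, by rw [← hdd1]; exact hdd, ?_⟩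
      have he : (i+1) + (k' : Int) = i + ((k'+1 : Nat) : Int) := by push_cast; ring
      rw [he]
      exact hstop
  | inr h =>
      right
      have hK : ((s.length : Int) - i).toNat = ((s.length : Int) - (i+1)).toNat + 1 := by omega
      rw [hK, hdd1] at h
      exact h

-- the ok-invariant survives a jump over a balanced '(' … ')' group
lemma okP_jump {s : List Char} {i j : Int} {M : Nat} (hget : PySem.List.pyGet? s i = some '(')
    (hM : (((s.length : Int)) - (i+1)).toNat ≤ M)
    (hj : findCloseAux s M (i+1) 1 = some j) (hok : pvOkP s i) : pvOkP s (j+1) := by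
  have hrange := getSome_range hget
  obtain ⟨hij, hjn, hfirst, hfinal⟩ := fc_char s M (i+1) 1 j hM (by norm_num) hj
  have hdd1 : ∀ k : Nat, pvDD s i (k+1) = 1 + pvDD s (i+1) k := fun k => by
    rw [dd_succ, charAt_eq hget]; simp [pvDelta]
  have hzero : pvDD s i ((j+1-i).toNat) = 0 := by
    have hnn : (j+1-i).toNat = (j-i).toNat + 1 := by omega
    rw [hnn, hdd1, show (j-i).toNat = (j+1-(i+1)).toNat by omega]
    exact hfinal
  have hpos : ∀ k : Nat, 0 < k → (k : Int) ≤ j - i → 0 < pvDD s i k := by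
    intro k hk hkj
    obtain ⟨k', rfl⟩ : ∃ k', k = k'+1 := ⟨k-1, by omega⟩
    rw [hdd1]
    exact hfirst k' (by omega)
  have hcast : i + (((j+1-i).toNat : Nat) : Int) = j + 1 := by omega
  cases hok with
  | inl h =>
      obtain ⟨k, hk, hdd, hstop⟩ := h
      have hge : (j+1-i).toNat ≤ k := by
        by_contra hlt'
        rcases Nat.eq_zero_or_pos k with rfl | hkpos
        · rw [show i + ((0:Nat):Int) = i by simp, charAt_eq hget] at hstop
          exact absurd hstop (by decide)
        · have h5 := hpos k hkpos (by omega)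
          linarith [hdd]
      left
      refine ⟨k - (j+1-i).toNat, by omega, ?_, ?_⟩
      · have e1 : (j+1-i).toNat + (k - (j+1-i).toNat) = k := by omega
        have e2 := dd_add s ((j+1-i).toNat) (k - (j+1-i).toNat) i
        rw [e1, hdd, hzero, hcast] at e2
        linarith
      · have e3 : (j+1) + ((k - (j+1-i).toNat : Nat) : Int) = i + (k : Int) := by omega
        rw [e3]
        exact hstop
  | inr h =>
      right
      have e1 : ((s.length : Int) - i).toNat = (j+1-i).toNat + (((s.length : Int) - (j+1)).toNat) := by omega
      rw [e1, dd_add, hzero, hcast] at h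
      linarith

-- the two scans agree under the ok-invariant
lemma main_loop (s : List Char) : ∀ (fA fB : Nat) (i : Int),
    (((s.length : Int) - i).toNat ≤ fA) → (((s.length : Int) - i).toNat ≤ fB) →
    pvOkP s i → loopA s fA i = loopB s fB i 0 := by
  intro fA
  induction fA with
  | zero =>
      intro fB i hA hB hok
      rw [loopA_ge (by omega), loopB_ge (by omega)]
  | succ fA ih =>
      intro fB i hA hB hok
      by_cases hlt : i < (s.length : Int)
      · obtain ⟨fb, rfl⟩ : ∃ fb, fB = fb+1 := ⟨fB-1, by omega⟩
        cases hget : PySem.List.pyGet? s i with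
        | none => rw [loopA_none hlt hget, loopB_none hlt hget]
        | some c =>
            by_cases hc1 : c = '('
            · subst hc1
              have hrange := getSome_range hget
              obtain ⟨M, hMeq⟩ : ∃ M, ((s.length : Int) - i).toNat = M + 1 :=
                ⟨((s.length : Int) - i).toNat - 1, by omega⟩
              have hdd1 : ∀ k : Nat, pvDD s i (k+1) = 1 + pvDD s (i+1) k := fun k => by
                rw [dd_succ, charAt_eq hget]; simp [pvDelta]
              have hex : ∃ m : Nat, (m : Int) ≤ (s.length : Int) - (i+1) ∧ 1 + pvDD s (i+1) m = 0 := by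
                cases hok with
                | inl h =>
                    obtain ⟨k, hk, hdd, hstop⟩ := h
                    obtain ⟨k', rfl⟩ : ∃ k', k = k'+1 := by
                      have hkpos : 0 < k := by
                        rcases Nat.eq_zero_or_pos k with rfl | h5
                        · exfalso
                          rw [show i + ((0:Nat):Int) = i by simp, charAt_eq hget] at hstop
                          exact absurd hstop (by decide)
                        · exact h5
                      exact ⟨k-1, by omega⟩
                    rw [hdd1] at hdd
                    exact ⟨k', by omega, hdd⟩
                | inr h =>
                    obtain ⟨K', hK⟩ : ∃ K', ((s.length : Int) - i).toNat = K'+1 :=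
                      ⟨((s.length : Int) - i).toNat - 1, by omega⟩
                    rw [hK, hdd1] at h
                    exact ⟨K', by omega, h⟩
              obtain ⟨j, hj⟩ := fc_some s M (i+1) 1 (by omega) (by norm_num) (by omega) hex
              obtain ⟨hij, hjn, -, -⟩ := fc_char s M (i+1) 1 j (by omega) (by norm_num) hj
              have hfc : findClose s i = some j := by
                unfold findClose
                rw [if_pos hget, hMeq, fca_step hlt hget (by decide)]
                rw [show (0 : Int) + pvDelta '(' = 1 by decide]
                exact hj
              rw [loopA_open hlt hget hfc (by omega)]
              rw [loopB_open hlt hget]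
              rw [show (0:Int)+1 = 1 by ring]
              rw [fc_loopB s fb M (i+1) 1 j fb (by omega) (by omega) (by omega) (by norm_num) hj]
              exact ih fb (j+1) (by omega) (by omega) (okP_jump hget (by omega) hj hok)
            · by_cases hst : c = '+' ∨ c = '-' ∨ c = ')'
              · rw [loopA_stop hlt hget hc1 hst]
                rcases hst with h | h | h
                · subst h; rw [loopB_sign0 hlt hget hc1 (by decide) (Or.inl rfl)]
                · subst h; rw [loopB_sign0 hlt hget hc1 (by decide) (Or.inr rfl)]
                · subst h; rw [loopB_close0 hlt hget]
              · have hc2 : c ≠ ')' := fun h => hst (Or.inr (Or.inr h))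
                rw [loopA_other hlt hget hc1 hst]
                rw [loopB_other hlt hget hc1 hc2 (by rintro ⟨-, h5⟩; exact hst (Or.elim h5 Or.inl (fun h6 => Or.inr (Or.inl h6))))]
                exact ih fb (i+1) (by omega) (by omega) (okP_step hget hc1 hc2 hst hok)
      · rw [loopA_ge hlt, loopB_ge hlt]

-- ===== VERDICT (by name: the statement is the Claim_ definition above) =====
theorem find_term_end_spec : Claim_equal_find_term_end := by
  intro string start _dom hpre
  unfold Spec_find_term_end
  unfold Pre_find_term_end at hpre
  obtain ⟨-, hok⟩ := hpre
  show loopA string.toList (((string.toList.length : Int) - (skipSignsA string.toList (((string.toList.length : Int) - start).toNat) start)).toNat) (skipSignsA string.toList (((string.toList.length : Int) - start).toNat) start)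
     = loopB string.toList (((string.toList.length : Int) - (skipSignsB string.toList (((string.toList.length : Int) - start).toNat) start)).toNat) (skipSignsB string.toList (((string.toList.length : Int) - start).toNat) start) 0
  rw [skipA_eq string.toList (((string.toList.length : Int) - start).toNat) start (le_refl _)]
  rw [skipB_eq string.toList (((string.toList.length : Int) - start).toNat) start (le_refl _)]
  exact main_loop string.toList _ _ _ (le_refl _) (le_refl _) ((okB_iff _ _).1 hok)
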